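-- pv_equiv track=rewrite | github.com/phalbert/katas | code/split_integer.py | splitInteger
-- ===== SOURCE A (Python) =====
-- def splitInteger(num,parts):
--     array = []
--     for i in range(parts):
--         if i < num % parts:
--             value = num // parts + 1
--         else:
--             value = num // parts
--         array.append(value)
--
--     return sorted(array)
-- ===== SOURCE B (Python) =====
-- def splitInteger(num, parts):
--     if parts <= 0:
--         return []
--     q, r = divmod(num, parts)
--     return [q] * (parts - r) + [q + 1] * r
-- ===== Notes on version B (the rewrite author's own statement) =====
-- stated objective: faster
-- what changed: Replaces the per-index loop plus sort with a closed form: one divmod, then (parts-r) copies of q followed by r copies of q+1, which is already sorted.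
import Mathlib
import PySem

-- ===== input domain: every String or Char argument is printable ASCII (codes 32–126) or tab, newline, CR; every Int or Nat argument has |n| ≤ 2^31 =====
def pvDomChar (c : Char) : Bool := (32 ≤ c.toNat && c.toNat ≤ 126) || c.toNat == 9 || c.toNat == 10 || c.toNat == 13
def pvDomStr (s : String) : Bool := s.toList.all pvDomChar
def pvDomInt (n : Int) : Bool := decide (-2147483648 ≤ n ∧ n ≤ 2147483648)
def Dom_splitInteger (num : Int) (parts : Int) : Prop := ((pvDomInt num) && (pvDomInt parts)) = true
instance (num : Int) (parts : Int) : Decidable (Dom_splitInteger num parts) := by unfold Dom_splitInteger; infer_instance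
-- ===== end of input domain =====

-- B replaces the per-index loop and final sort by one divmod and two replicated runs (already sorted): asymptotically faster.


-- ===== PORT A =====
def splitInteger (num : Int) (parts : Int) : List Int :=
  let array : List Int :=
    (PySem.List.pyRange 0 parts 1).foldl (fun acc i =>
      acc ++ [if i < PySem.Int.mod num parts
              then PySem.Int.floordiv num parts + 1
              else PySem.Int.floordiv num parts]) []
  PySem.List.sorted array (fun x => x) false

-- ===== PORT B =====
def splitInteger_alt (num : Int) (parts : Int) : List Int :=
  if parts ≤ 0 then []
  else
    match PySem.Int.divmod? num parts with
    | some (q, r) => List.replicate (parts - r).toNat q ++ List.replicate r.toNat (q + 1)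
    | none => []

-- ===== PRECONDITION & SPEC =====
def Spec_splitInteger (num : Int) (parts : Int) (out : List Int) : Prop := out = splitInteger_alt num parts
instance (num : Int) (parts : Int) (out : List Int) : Decidable (Spec_splitInteger num parts out) := by unfold Spec_splitInteger; infer_instance

-- ===== CLAIM (what is proved, stated in full; the proofs are below) =====
def Claim_equal_splitInteger : Prop := ∀ (num : Int) (parts : Int), Dom_splitInteger num parts → Spec_splitInteger num parts (splitInteger num parts)

-- ===== LEMMAS AND PROOFS =====
theorem map_const_eq_replicate {α β : Type} (f : α → β) (c : β) :
    ∀ (l : List α), (∀ x ∈ l, f x = c) → l.map f = List.replicate l.length c := by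
  intro l
  induction l with
  | nil => intro _; rfl
  | cons a t ih =>
    intro h
    simp only [List.map_cons, List.length_cons, List.replicate_succ]
    rw [h a (by simp), ih (fun x hx => h x (by simp [hx]))]

theorem splitInteger_spec_aux (num parts : Int) :
    splitInteger num parts = splitInteger_alt num parts := by
  by_cases hp : parts ≤ 0
  · simp [splitInteger, splitInteger_alt, hp, PySem.List.pyRange_one_eq_nil hp,
      PySem.List.sorted_eq_nil_iff]
  · replace hp : 0 < parts := by omega
    set q := PySem.Int.floordiv num parts with hq
    set r := PySem.Int.mod num parts with hr
    have hrb : 0 ≤ r ∧ r < parts := by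
      rw [hr, PySem.Int.mod_eq_emod_of_pos hp]
      exact ⟨Int.emod_nonneg num (by omega), Int.emod_lt_of_pos num hp⟩
    have hsplit : PySem.List.pyRange 0 parts 1 =
        PySem.List.pyRange 0 r 1 ++ PySem.List.pyRange r parts 1 :=
      PySem.List.pyRange_one_append 0 r parts (by omega) (by omega)
    have harr : (PySem.List.pyRange 0 parts 1).foldl (fun acc i =>
        acc ++ [if i < r then q + 1 else q]) [] =
        List.replicate r.toNat (q + 1) ++ List.replicate (parts - r).toNat q := by
      rw [PySem.List.foldl_append_singleton_eq_map, List.nil_append, hsplit, List.map_append]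
      congr 1
      · rw [map_const_eq_replicate _ (q + 1) _ (by
          intro x hx
          rw [PySem.List.mem_pyRange_one] at hx
          simp [if_pos hx.2])]
        rw [PySem.List.length_pyRange_one]
        norm_num
      · rw [map_const_eq_replicate _ q _ (by
          intro x hx
          rw [PySem.List.mem_pyRange_one] at hx
          simp only [if_neg (by omega : ¬ x < r)])]
        rw [PySem.List.length_pyRange_one]
    have hdm : PySem.Int.divmod? num parts = some (q, r) := by
      simp only [PySem.Int.divmod?, PySem.Int.floordiv, PySem.Int.mod, hq, hr,
        if_neg (by omega : ¬ parts = 0)]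
    have hsorted : PySem.List.sorted
        (List.replicate r.toNat (q + 1) ++ List.replicate (parts - r).toNat q)
        (fun x => x) false =
        List.replicate (parts - r).toNat q ++ List.replicate r.toNat (q + 1) := by
      apply PySem.List.sorted_id_eq_of_perm_of_pairwise
      · exact List.perm_append_comm
      · rw [List.pairwise_append]
        refine ⟨List.pairwise_replicate.2 (by simp), List.pairwise_replicate.2 (by simp), ?_⟩
        intro a ha b hb
        rw [List.eq_of_mem_replicate ha, List.eq_of_mem_replicate hb]
        omega
    simp only [splitInteger, splitInteger_alt, hdm, if_neg (by omega : ¬ parts ≤ 0)]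
    rw [← hq, ← hr, harr, hsorted]

-- ===== VERDICT (by name: the statement is the Claim_ definition above) =====
theorem splitInteger_spec : Claim_equal_splitInteger := by
  intro num parts _
  exact splitInteger_spec_aux num parts
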